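-- pv_equiv track=rewrite | github.com/MarlonTri/spanishVocabBuilder | espy/vocab/ankiBuilder.py | morph_to_text
-- ===== SOURCE A (Python) =====
-- def morph_to_text(morph):
--     t = ""
--     for i, (k, v) in enumerate(morph.items()):
--         if i % 3 == 0:
--             t = t + "<br>"
--         else:
--             t = t + "|"
--         t = t + k + "=" + v
--
--     return t
-- ===== SOURCE B (Python) =====
-- def morph_to_text(morph):
--     items = list(morph.items())
--     parts = []
--     for j in range(0, len(items), 3):
--         parts.append("<br>" + "|".join(k + "=" + v for k, v in items[j:j+3]))
--     return "".join(parts)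
-- ===== Notes on version B (the rewrite author's own statement) =====
-- stated objective: alternative
-- what changed: Replaces the per-element i%3 separator test with a two-level pass: the items are sliced into chunks of three, each chunk is rendered as '<br>' plus a '|'-join, and the chunk strings are joined.
import Mathlib
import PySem

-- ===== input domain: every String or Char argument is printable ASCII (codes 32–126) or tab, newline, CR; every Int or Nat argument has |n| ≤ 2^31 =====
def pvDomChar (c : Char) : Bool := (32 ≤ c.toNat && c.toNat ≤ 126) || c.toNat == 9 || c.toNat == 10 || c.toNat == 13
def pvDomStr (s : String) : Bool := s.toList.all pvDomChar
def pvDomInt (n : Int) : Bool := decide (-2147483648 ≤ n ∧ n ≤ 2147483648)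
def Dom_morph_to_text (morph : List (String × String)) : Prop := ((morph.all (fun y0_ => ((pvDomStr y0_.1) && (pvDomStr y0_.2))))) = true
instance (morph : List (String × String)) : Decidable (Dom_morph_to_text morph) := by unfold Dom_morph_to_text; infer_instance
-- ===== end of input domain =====

-- B renders the items in chunks of three ('<br>' + '|'-join per chunk) instead of A's per-element i%3 separator test; alternative decomposition, same cost.


-- ===== PORT A =====
-- for i, (k, v) in enumerate(morph.items()): t += "<br>"/"|" then k+"="+v
def morphGoA : Nat → List (String × String) → String → String
  | _, [], t => t
  | i, (k, v) :: rest, t =>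
      morphGoA (i + 1) rest ((if i % 3 == 0 then t ++ "<br>" else t ++ "|") ++ k ++ "=" ++ v)

def morph_to_text (morph : List (String × String)) : String :=
  morphGoA 0 morph ""

-- ===== PORT B =====
-- "|".join(k + "=" + v for k, v in chunk)
def morphJoinChunk : List (String × String) → String
  | [] => ""
  | [(k, v)] => k ++ "=" ++ v
  | (k, v) :: rest => k ++ "=" ++ v ++ "|" ++ morphJoinChunk rest

-- iterate over items in chunks of three, prefixing each chunk string with "<br>"
def morphGoB : List (String × String) → String
  | [] => ""
  | x :: rest =>
      "<br>" ++ morphJoinChunk (x :: rest.take 2) ++ morphGoB (rest.drop 2)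
termination_by l => l.length
decreasing_by simp

def morph_to_text_alt (morph : List (String × String)) : String :=
  morphGoB morph

-- ===== PRECONDITION & SPEC =====
def Spec_morph_to_text (morph : List (String × String)) (out : String) : Prop := out = morph_to_text_alt morph
instance (morph : List (String × String)) (out : String) : Decidable (Spec_morph_to_text morph out) := by unfold Spec_morph_to_text; infer_instance

-- ===== CLAIM (what is proved, stated in full; the proofs are below) =====
def Claim_equal_morph_to_text : Prop := ∀ (morph : List (String × String)), Dom_morph_to_text morph → Spec_morph_to_text morph (morph_to_text morph)

-- ===== LEMMAS AND PROOFS =====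

theorem morphGoA_acc (l : List (String × String)) : ∀ (i : Nat) (t : String),
    morphGoA i l t = t ++ morphGoA i l "" := by
  induction l with
  | nil => intro i t; simp [morphGoA]
  | cons x rest ih =>
      intro i t
      obtain ⟨k, v⟩ := x
      simp only [morphGoA]
      rw [ih (i+1), ih (i+1) ((if (i % 3 == 0) then ("" : String) ++ "<br>" else "" ++ "|") ++ k ++ "=" ++ v)]
      by_cases h : i % 3 == 0 <;> simp [h, String.append_assoc]

theorem morphGoA_chunk : ∀ (n : Nat) (l : List (String × String)), l.length = n →
    ∀ (i : Nat), i % 3 = 0 → morphGoA i l "" = morphGoB l := by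
  intro n
  induction n using Nat.strong_induction_on with
  | _ n ih =>
    intro l hn i hi
    match l with
    | [] => simp [morphGoA, morphGoB]
    | [(k, v)] =>
        simp [morphGoA, morphGoB, morphJoinChunk, hi, String.append_assoc]
    | [(k, v), (k2, v2)] =>
        have h1 : (i + 1) % 3 ≠ 0 := by omega
        simp [morphGoA, morphGoB, morphJoinChunk, hi, h1, String.append_assoc]
    | (k, v) :: (k2, v2) :: (k3, v3) :: rest' =>
        have h1 : (i + 1) % 3 ≠ 0 := by omega
        have h2 : (i + 1 + 1) % 3 ≠ 0 := by omega
        have h3 : (i + 1 + 1 + 1) % 3 = 0 := by omega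
        have hlen : rest'.length < n := by simp at hn; omega
        simp only [morphGoA, morphGoB, morphJoinChunk, List.take, List.drop]
        rw [morphGoA_acc, ih rest'.length hlen rest' rfl _ h3]
        simp [hi, h1, h2, String.append_assoc]

-- ===== VERDICT (by name: the statement is the Claim_ definition above) =====
theorem morph_to_text_spec : Claim_equal_morph_to_text := by
  intro morph _
  unfold Spec_morph_to_text morph_to_text morph_to_text_alt
  exact morphGoA_chunk morph.length morph rfl 0 rfl
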